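-- pv_equiv track=rewrite | github.com/Mullery228/RightLabWork5 | Task_3.py | check_gen
-- ===== SOURCE A (Python) =====
-- def check_gen(tutors: list, klasses: list):
--     for i in range(len(tutors)):
--         kor = list()
--         if len(klasses) - 1 - i >= 0:
--             kor.append(tutors[i])
--             kor.append(klasses[i])
--         else:
--             kor.append(tutors[i])
--             kor.append(None)
--         kor = tuple(kor)
--         yield kor
-- ===== SOURCE B (Python) =====
-- def check_gen(tutors: list, klasses: list):
--     # Two staged segments: the fully matched prefix (a plain zip over slices),
--     # then the unmatched tutor tail padded with None.
--     k = min(len(tutors), len(klasses))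
--     yield from zip(tutors[:k], klasses[:k])
--     for t in tutors[k:]:
--         yield (t, None)
-- ===== Notes on version B (the rewrite author's own statement) =====
-- stated objective: simpler
-- what changed: B splits the output into two staged segments computed separately -- a zip of the matched slice prefixes, then the leftover tutors paired with None -- instead of A's single index loop with a per-index bounds test deciding each pair.
import Mathlib
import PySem

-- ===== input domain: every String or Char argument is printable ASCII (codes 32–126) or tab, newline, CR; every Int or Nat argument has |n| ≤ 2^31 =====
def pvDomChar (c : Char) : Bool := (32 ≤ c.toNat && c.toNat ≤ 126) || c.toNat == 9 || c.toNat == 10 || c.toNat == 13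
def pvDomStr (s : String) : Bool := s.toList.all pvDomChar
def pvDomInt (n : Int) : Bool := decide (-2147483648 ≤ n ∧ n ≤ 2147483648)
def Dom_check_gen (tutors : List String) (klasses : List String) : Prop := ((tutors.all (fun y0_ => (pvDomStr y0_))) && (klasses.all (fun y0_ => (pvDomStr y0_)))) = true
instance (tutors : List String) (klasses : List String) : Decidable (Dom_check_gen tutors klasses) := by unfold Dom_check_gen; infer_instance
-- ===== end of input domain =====

-- B builds the output as two staged segments (zip of matched slices, then the None-padded tutor tail)
-- instead of A's index loop with a per-index bounds test; same values, simpler decomposition.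
-- Both Pythons are generators; the ports materialise the yielded sequence as a list.

-- ===== PORT A =====
-- for i in range(len(tutors)): yield (tutors[i], klasses[i]) if len(klasses)-1-i >= 0 else (tutors[i], None)
-- (tutors[i] and klasses[i] are in bounds wherever A reads them, so pyGetD with a dummy default is exact)
def check_gen (tutors : List String) (klasses : List String) : List (String × Option String) :=
  (PySem.List.pyRange 0 (tutors.length : Int) 1).map (fun i =>
    if (klasses.length : Int) - 1 - i ≥ 0 then
      (PySem.List.pyGetD tutors i "", some (PySem.List.pyGetD klasses i ""))
    else
      (PySem.List.pyGetD tutors i "", none))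

-- ===== PORT B =====
-- k = min(len(tutors), len(klasses)); zip(tutors[:k], klasses[:k]) then (t, None) for t in tutors[k:]
-- (the slices have nonnegative literal bounds, so List.take/drop are exact)
def check_gen_alt (tutors : List String) (klasses : List String) : List (String × Option String) :=
  let k := min tutors.length klasses.length
  ((tutors.take k).zip (klasses.take k)).map (fun p => (p.1, some p.2))
    ++ (tutors.drop k).map (fun t => (t, none))

-- ===== PRECONDITION & SPEC =====
def Spec_check_gen (tutors : List String) (klasses : List String) (out : List (String × Option String)) : Prop := out = check_gen_alt tutors klasses
instance (tutors : List String) (klasses : List String) (out : List (String × Option String)) : Decidable (Spec_check_gen tutors klasses out) := by unfold Spec_check_gen; infer_instance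

-- ===== CLAIM =====
def Claim_equal_check_gen : Prop := ∀ (tutors : List String) (klasses : List String), Dom_check_gen tutors klasses → Spec_check_gen tutors klasses (check_gen tutors klasses)

-- ===== LEMMAS AND PROOFS =====

theorem check_gen_cons (t : String) (ts ks : List String) :
    check_gen (t :: ts) ks = (t, ks.head?) :: check_gen ts ks.tail := by
  cases ks with
  | nil =>
    simp [check_gen, PySem.List.pyRange_one, List.range_succ_eq_map, List.map_map,
      Function.comp]
    intro a ha
    have h : ((a:Int)+1) = ((a+1:Nat):Int) := by push_cast; ring
    rw [if_neg (show ¬((a:Int) < -1) by omega), if_neg (show ¬((a:Int) ≤ -1) by omega)]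
    simp only [h, PySem.List.pyGetD_natCast, List.getD_eq_getElem?_getD,
      List.getElem?_cons_succ]
  | cons k kt =>
    simp [check_gen, PySem.List.pyRange_one, List.range_succ_eq_map, List.map_map,
      Function.comp]
    intro a ha
    have h : ((a:Int)+1) = ((a+1:Nat):Int) := by push_cast; ring
    by_cases hk : a < kt.length
    · rw [if_pos hk]
      simp only [h, PySem.List.pyGetD_natCast, List.getD_eq_getElem?_getD,
        List.getElem?_cons_succ]
      simp [hk]
    · rw [if_neg hk, if_neg hk]
      simp only [h, PySem.List.pyGetD_natCast, List.getD_eq_getElem?_getD,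
        List.getElem?_cons_succ]

theorem check_gen_alt_cons (t : String) (ts ks : List String) :
    check_gen_alt (t :: ts) ks = (t, ks.head?) :: check_gen_alt ts ks.tail := by
  cases ks with
  | nil => simp [check_gen_alt]
  | cons k kt =>
    simp only [check_gen_alt, List.length_cons, List.head?_cons, List.tail_cons,
      Nat.succ_min_succ, List.take_succ_cons, List.zip_cons_cons, List.map_cons,
      List.drop_succ_cons, List.cons_append]

theorem dom_tail (t : String) (ts ks : List String) (h : Dom_check_gen (t :: ts) ks) :
    Dom_check_gen ts ks.tail := by
  unfold Dom_check_gen at *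
  simp only [Bool.and_eq_true, List.all_eq_true] at *
  exact ⟨fun x hx => h.1 x (List.mem_cons_of_mem _ hx),
         fun x hx => h.2 x (List.mem_of_mem_tail hx)⟩

-- ===== VERDICT =====
theorem check_gen_spec : Claim_equal_check_gen := by
  intro tutors klasses
  unfold Spec_check_gen
  induction tutors generalizing klasses with
  | nil => intro _; simp [check_gen, check_gen_alt, PySem.List.pyRange_one_eq_nil]
  | cons t ts ih =>
    intro hdom
    rw [check_gen_cons, check_gen_alt_cons, ih klasses.tail (dom_tail t ts klasses hdom)]
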